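-- pv_equiv track=rewrite | github.com/dsysoev/fun-with-python | profiling_to_find_bottlenecks/find_closest_sum.py | find_closest_sum1
-- ===== SOURCE A (Python) =====
-- def find_closest_sum1(vlst, tlst):
--
--     # sort
--     vlist = sorted(vlst)
--
--     targets = []
--     for target in tlst:
--         vmin = float('Inf')
--         closest = None
--         for i in range(len(vlist)):
--             value = abs(vlist[i] - target)
--             if value <= vmin:
--                 vmin = value
--                 closest = i
--
--         targets.extend(vlist[:closest + 1])
--
--     return sum(targets)
-- ===== SOURCE B (Python) =====
-- from bisect import bisect_left, bisect_right
--
--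
-- def find_closest_sum1(vlst, tlst):
--     v = sorted(vlst)
--     n = len(v)
--     prefix = [0]
--     for x in v:
--         prefix.append(prefix[-1] + x)
--     total = 0
--     for t in tlst:
--         j = bisect_left(v, t)
--         if j == n:
--             c = n - 1
--         elif j == 0 or v[j] - t <= t - v[j - 1]:
--             c = bisect_right(v, v[j]) - 1
--         else:
--             c = j - 1
--         total += prefix[c + 1]
--     return total
-- ===== Notes on version B (the rewrite author's own statement) =====
-- stated objective: faster
-- what changed: B replaces A's per-target linear scan for the closest element and repeated list concatenation with a prefix-sum table built once plus two binary searches (bisect) per target, preserving A's later-index tie-break.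
-- outside the precondition, e.g. on find_closest_sum1([], [3]): A raises TypeError, B returns 0
-- crash fix: On an empty vlst with a nonempty tlst A raises TypeError (closest stays None, so vlist[:None + 1] fails); B returns 0. — e.g. on find_closest_sum1([], [3]): A raises TypeError, B returns 0
import Mathlib
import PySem

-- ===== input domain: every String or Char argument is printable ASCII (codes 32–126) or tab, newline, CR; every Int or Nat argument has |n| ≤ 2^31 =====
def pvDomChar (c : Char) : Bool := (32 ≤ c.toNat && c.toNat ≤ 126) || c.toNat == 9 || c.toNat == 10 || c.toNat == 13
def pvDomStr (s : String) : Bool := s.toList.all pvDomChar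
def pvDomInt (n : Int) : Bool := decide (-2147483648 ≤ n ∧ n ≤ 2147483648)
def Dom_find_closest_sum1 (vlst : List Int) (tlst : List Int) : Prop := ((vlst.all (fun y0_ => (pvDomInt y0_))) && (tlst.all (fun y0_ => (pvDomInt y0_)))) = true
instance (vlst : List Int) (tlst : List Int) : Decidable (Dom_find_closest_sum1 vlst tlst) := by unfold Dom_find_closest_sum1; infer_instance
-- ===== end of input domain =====

-- B replaces A's per-target linear argmin scan and list concatenation with binary search
-- (bisect) for the closest index plus a prefix-sum table: O((n+m) log n) vs O(n·m).

-- ===== PORT A =====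
-- inner-loop step of A: state (vmin, closest); vmin = none models the initial float('Inf')
-- (any value satisfies value <= Inf), closest = none models Python's None.
def stepA (vlist : List Int) (target : Int) (st : Option Int × Option Nat) (i : Nat) : Option Int × Option Nat :=
  let value := |vlist.getD i 0 - target|
  match st.1 with
  | none => (some value, some i)
  | some vmin => if value ≤ vmin then (some value, some i) else st

def find_closest_sum1 (vlst : List Int) (tlst : List Int) : Int :=
  let vlist := PySem.List.sorted vlst (fun x => x) false
  let targets := tlst.foldl (fun (targets : List Int) target =>
    let st := (List.range vlist.length).foldl (stepA vlist target) (none, none)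
    match st.2 with
    | some closest => targets ++ vlist.take (closest + 1)  -- vlist[:closest+1], closest ≥ 0
    | none => targets  -- Python raises TypeError (None + 1) here; excluded by Pre_
    ) []
  targets.sum

-- ===== PORT B =====
-- Source B hand-builds the prefix-sum table: prefix.append(prefix[-1] + x)
def stepPrefix (p : List Int) (x : Int) : List Int := p ++ [p.getD (p.length - 1) 0 + x]

-- the closest-index computation of Source B's loop body (bisect_left/bisect_right are PySem's)
def closestB (v : List Int) (n : Nat) (t : Int) : Int :=
  let j := PySem.List.bisectLeft v t
  if j = n then (n : Int) - 1
  else if j = 0 ∨ v.getD j 0 - t ≤ t - v.getD (j - 1) 0 then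
    (PySem.List.bisectRight v (v.getD j 0) : Int) - 1
  else (j : Int) - 1

def find_closest_sum1_alt (vlst : List Int) (tlst : List Int) : Int :=
  let v := PySem.List.sorted vlst (fun x => x) false
  let n := v.length
  let pfx := v.foldl stepPrefix [0]
  tlst.foldl (fun (total : Int) t => total + pfx.getD (closestB v n t + 1).toNat 0) 0

-- ===== PRECONDITION & SPEC =====
-- Pre_ excludes only the inputs where A raises TypeError (empty vlst with a nonempty tlst:
-- closest stays None and vlist[:None+1] raises); B returns 0 there.
def Pre_find_closest_sum1 (vlst : List Int) (tlst : List Int) : Prop := vlst ≠ [] ∨ tlst = []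
instance (vlst : List Int) (tlst : List Int) : Decidable (Pre_find_closest_sum1 vlst tlst) := by
  unfold Pre_find_closest_sum1; infer_instance
def pvWitness_find_closest_sum1 : List Int × List Int := ([3, 1, 2], [2, 5])

-- On empty vlst with nonempty tlst A raises TypeError (None + 1); B returns 0.
def Raises_find_closest_sum1 (vlst : List Int) (tlst : List Int) : Prop := vlst = [] ∧ tlst ≠ []
instance (vlst : List Int) (tlst : List Int) : Decidable (Raises_find_closest_sum1 vlst tlst) := by
  unfold Raises_find_closest_sum1; infer_instance
def pvRaiseWitness_find_closest_sum1 : List Int × List Int := ([], [3])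
def pvRaiseWitnessOut_find_closest_sum1 : Int := 0

def Spec_find_closest_sum1 (vlst : List Int) (tlst : List Int) (out : Int) : Prop := out = find_closest_sum1_alt vlst tlst
instance (vlst : List Int) (tlst : List Int) (out : Int) : Decidable (Spec_find_closest_sum1 vlst tlst out) := by unfold Spec_find_closest_sum1; infer_instance

-- ===== CLAIM (what is proved, stated in full; the proofs are below) =====
def Claim_equal_find_closest_sum1 : Prop := ∀ (vlst : List Int) (tlst : List Int), Dom_find_closest_sum1 vlst tlst → Pre_find_closest_sum1 vlst tlst → Spec_find_closest_sum1 vlst tlst (find_closest_sum1 vlst tlst)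
def Claim_raises_find_closest_sum1 : Prop := (∀ (vlst : List Int) (tlst : List Int), Dom_find_closest_sum1 vlst tlst → Raises_find_closest_sum1 vlst tlst → ¬ Pre_find_closest_sum1 vlst tlst) ∧ (Dom_find_closest_sum1 (pvRaiseWitness_find_closest_sum1.1) (pvRaiseWitness_find_closest_sum1.2) ∧ Raises_find_closest_sum1 (pvRaiseWitness_find_closest_sum1.1) (pvRaiseWitness_find_closest_sum1.2) ∧ find_closest_sum1_alt (pvRaiseWitness_find_closest_sum1.1) (pvRaiseWitness_find_closest_sum1.2) = pvRaiseWitnessOut_find_closest_sum1)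

-- ===== LEMMAS AND PROOFS =====

-- distance of index i to the target (out-of-range reads default to 0; only in-range indices matter)
def dfun (v : List Int) (t : Int) (i : Nat) : Int := |v.getD i 0 - t|

-- A's inner loop computes the LAST index of minimal distance
theorem stepA_char (v : List Int) (t : Int) :
    ∀ n : Nat, 0 < n → ∃ c : Nat, c < n ∧
      (List.range n).foldl (stepA v t) (none, none) = (some (dfun v t c), some c) ∧
      (∀ i, i < n → dfun v t c ≤ dfun v t i) ∧
      (∀ i, i < n → c < i → dfun v t c < dfun v t i) := by
  intro n hn
  induction n with
  | zero => omega
  | succ m ih =>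
    rcases Nat.eq_zero_or_pos m with hm | hm
    · subst hm
      refine ⟨0, by omega, ?_, ?_, ?_⟩
      · simp [stepA, dfun]
      · intro i hi; interval_cases i; exact le_refl _
      · intro i hi; omega
    · obtain ⟨c, hc, heq, hmin, hstrict⟩ := ih hm
      rw [List.range_succ, List.foldl_append, heq]
      by_cases hle : dfun v t m ≤ dfun v t c
      · refine ⟨m, by omega, ?_, ?_, ?_⟩
        · simp only [List.foldl_cons, List.foldl_nil]; dsimp only [stepA]; rw [show |v.getD m 0 - t| = dfun v t m from rfl, if_pos hle]
        · intro i hi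
          rcases Nat.lt_succ_iff_lt_or_eq.mp hi with h | h
          · exact le_trans hle (hmin i h)
          · subst h; exact le_refl _
        · intro i hi hmi; omega
      · refine ⟨c, by omega, ?_, ?_, ?_⟩
        · simp only [List.foldl_cons, List.foldl_nil]; dsimp only [stepA]; rw [show |v.getD m 0 - t| = dfun v t m from rfl, if_neg hle]
        · intro i hi
          rcases Nat.lt_succ_iff_lt_or_eq.mp hi with h | h
          · exact hmin i h
          · subst h; exact le_of_lt (lt_of_not_ge hle)
        · intro i hi hci
          rcases Nat.lt_succ_iff_lt_or_eq.mp hi with h | h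
          · exact hstrict i h hci
          · subst h; exact lt_of_not_ge hle


-- B's branch computes an index with the same two properties (on a sorted list)
theorem closestB_char (v : List Int) (t : Int)
    (hs : v.Pairwise (· ≤ ·)) (hn : 0 < v.length) :
    ∃ c : Nat, closestB v v.length t = (c : Int) ∧ c < v.length ∧
      (∀ i, i < v.length → dfun v t c ≤ dfun v t i) ∧
      (∀ i, i < v.length → c < i → dfun v t c < dfun v t i) := by
  have hmono : ∀ p q : Nat, p ≤ q → ∀ hq : q < v.length, v.getD p 0 ≤ v.getD q 0 := by
    intro p q hpq hq
    rcases Nat.lt_or_ge p q with h | h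
    · have := (List.pairwise_iff_getElem.mp hs) p q (by omega) hq h
      rwa [List.getD_eq_getElem _ _ (by omega), List.getD_eq_getElem _ _ hq]
    · have : p = q := by omega
      subst this; exact le_refl _
  obtain ⟨hj1, hjlt, hjge⟩ := PySem.List.bisectLeft_spec v t hs
  set j := PySem.List.bisectLeft v t with hjdef
  have hlt : ∀ i, i < v.length → i < j → v.getD i 0 < t := by
    intro i hi hij
    rw [List.getD_eq_getElem _ _ hi]; exact hjlt i hi hij
  have hge : ∀ i, i < v.length → j ≤ i → t ≤ v.getD i 0 := by
    intro i hi hij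
    rw [List.getD_eq_getElem _ _ hi]; exact hjge i hi hij
  have habs_lt : ∀ i, i < v.length → i < j → dfun v t i = t - v.getD i 0 := by
    intro i hi hij
    have := hlt i hi hij
    rw [dfun, abs_of_neg (by omega), neg_sub]
  have habs_ge : ∀ i, i < v.length → j ≤ i → dfun v t i = v.getD i 0 - t := by
    intro i hi hij
    have := hge i hi hij
    rw [dfun, abs_of_nonneg (by omega)]
  by_cases hjn : j = v.length
  · -- c = n - 1 : everything is < t, last element is closest
    refine ⟨v.length - 1, ?_, by omega, ?_, by omega⟩
    · unfold closestB
      rw [← hjdef, if_pos hjn]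
      omega
    · intro i hi
      rw [habs_lt _ (by omega) (by omega), habs_lt i hi (by omega)]
      have := hmono i (v.length - 1) (by omega) (by omega)
      omega
  · have hjn' : j < v.length := by omega
    by_cases hcase : j = 0 ∨ v.getD j 0 - t ≤ t - v.getD (j - 1) 0
    · -- c = bisectRight v v[j] - 1 : last occurrence of the value v[j]
      obtain ⟨hub1, hblt, hbgt⟩ := PySem.List.bisectRight_spec v (v.getD j 0) hs
      set ub := PySem.List.bisectRight v (v.getD j 0) with hubdef
      have hble : ∀ i, i < v.length → i < ub → v.getD i 0 ≤ v.getD j 0 := by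
        intro i hi hij
        rw [List.getD_eq_getElem _ _ hi]
        exact hblt i hi hij
      have hbgt' : ∀ i, i < v.length → ub ≤ i → v.getD j 0 < v.getD i 0 := by
        intro i hi hij
        rw [List.getD_eq_getElem _ _ hi]
        exact hbgt i hi hij
      have hjub : j < ub := by
        by_contra h
        exact absurd (hbgt' j hjn' (by omega)) (by omega)
      refine ⟨ub - 1, ?_, by omega, ?_, ?_⟩
      · unfold closestB
        rw [← hjdef, if_neg hjn, if_pos hcase, ← hubdef]
        omega
      · -- v[ub-1] = v[j]
        have hc : v.getD (ub - 1) 0 = v.getD j 0 :=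
          le_antisymm (hble _ (by omega) (by omega)) (hmono j (ub - 1) (by omega) (by omega))
        intro i hi
        rw [habs_ge (ub - 1) (by omega) (by omega), hc]
        rcases Nat.lt_or_ge i j with h | h
        · have hj0 : j ≠ 0 := by omega
          have hcase' : v.getD j 0 - t ≤ t - v.getD (j - 1) 0 := hcase.resolve_left hj0
          rw [habs_lt i hi h]
          have := hmono i (j - 1) (by omega) (by omega)
          omega
        · rw [habs_ge i hi h]
          have := hmono j i h hi
          omega
      · intro i hi hci
        have hc : v.getD (ub - 1) 0 = v.getD j 0 :=
          le_antisymm (hble _ (by omega) (by omega)) (hmono j (ub - 1) (by omega) (by omega))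
        rw [habs_ge (ub - 1) (by omega) (by omega), hc, habs_ge i hi (by omega)]
        have := hbgt' i hi (by omega)
        omega
    · -- c = j - 1 : the predecessor is strictly closer
      have hj0 : j ≠ 0 := by
        intro h; exact hcase (Or.inl h)
      have hfar : t - v.getD (j - 1) 0 < v.getD j 0 - t := by
        have := (not_or.mp hcase).2
        omega
      refine ⟨j - 1, ?_, by omega, ?_, ?_⟩
      · unfold closestB
        rw [← hjdef, if_neg hjn, if_neg hcase]
        omega
      · intro i hi
        rw [habs_lt (j - 1) (by omega) (by omega)]
        rcases Nat.lt_or_ge i j with h | h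
        · rw [habs_lt i hi h]
          have := hmono i (j - 1) (by omega) (by omega)
          omega
        · rw [habs_ge i hi h]
          have := hmono j i h hi
          omega
      · intro i hi hci
        rw [habs_lt (j - 1) (by omega) (by omega), habs_ge i hi (by omega)]
        have := hmono j i (by omega) hi
        omega


-- those two properties determine the index uniquely
theorem argmin_unique (v : List Int) (t : Int) {c₁ c₂ : Nat}
    (h₁ : c₁ < v.length) (h₂ : c₂ < v.length)
    (m₁ : ∀ i, i < v.length → dfun v t c₁ ≤ dfun v t i)
    (s₁ : ∀ i, i < v.length → c₁ < i → dfun v t c₁ < dfun v t i)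
    (m₂ : ∀ i, i < v.length → dfun v t c₂ ≤ dfun v t i)
    (s₂ : ∀ i, i < v.length → c₂ < i → dfun v t c₂ < dfun v t i) : c₁ = c₂ := by
  rcases Nat.lt_trichotomy c₁ c₂ with h | h | h
  · exact absurd (s₁ c₂ h₂ h) (not_lt.mpr (m₂ c₁ h₁))
  · exact h
  · exact absurd (s₂ c₁ h₁ h) (not_lt.mpr (m₁ c₂ h₂))

-- the prefix-sum table: entry k is the sum of the first k elements
theorem stepPrefix_fold (v : List Int) : ∀ (p : List Int) (s : Int), p ≠ [] → p.getD (p.length - 1) 0 = s →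
    v.foldl stepPrefix p = p ++ (List.range v.length).map (fun k => s + (v.take (k+1)).sum) := by
  induction v with
  | nil => intro p s _ _; simp
  | cons x v' ih =>
    intro p s hp hs
    have h1 : List.foldl stepPrefix p (x :: v') = List.foldl stepPrefix (p ++ [s + x]) v' := by
      rw [List.foldl_cons]; dsimp only [stepPrefix]; rw [hs]
    rw [h1, ih (p ++ [s + x]) (s + x) (by simp) (by simp)]
    rw [List.length_cons, List.range_succ_eq_map]
    simp [List.map_map, Function.comp, add_assoc]

theorem prefix_getD (v : List Int) :
    ∀ k : Nat, k ≤ v.length → (v.foldl stepPrefix [0]).getD k 0 = (v.take k).sum := by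
  intro k hk
  rw [stepPrefix_fold v [0] 0 (by simp) (by simp)]
  cases k with
  | zero => simp
  | succ k' =>
    have hk' : k' < v.length := by omega
    have hlen : k' < ((List.range v.length).map (fun k => 0 + (v.take (k+1)).sum)).length := by
      simpa using hk'
    simp only [List.singleton_append, List.getD_cons_succ]
    rw [List.getD_eq_getElem _ _ hlen]
    simp


-- per-target steps agree, hence the folds agree
theorem main_fold (v : List Int) (hs : v.Pairwise (· ≤ ·)) (hn : 0 < v.length) :
    ∀ (tlst : List Int) (targets : List Int) (total : Int), targets.sum = total →
      (tlst.foldl (fun (targets : List Int) target =>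
          let st := (List.range v.length).foldl (stepA v target) (none, none)
          match st.2 with
          | some closest => targets ++ v.take (closest + 1)
          | none => targets) targets).sum
      = tlst.foldl (fun (total : Int) t =>
          total + (v.foldl stepPrefix [0]).getD (closestB v v.length t + 1).toNat 0) total := by
  intro tlst
  induction tlst with
  | nil => intro targets total h; simpa using h
  | cons t ts ih =>
    intro targets total h
    obtain ⟨cA, hcA, heqA, hminA, hstrA⟩ := stepA_char v t v.length hn
    obtain ⟨cB, heqB, hcB, hminB, hstrB⟩ := closestB_char v t hs hn
    have hceq : cA = cB := argmin_unique v t hcA hcB hminA hstrA hminB hstrB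
    rw [List.foldl_cons, List.foldl_cons, heqA]
    have htoNat : (closestB v v.length t + 1).toNat = cB + 1 := by
      rw [heqB]; omega
    have hpfx : (v.foldl stepPrefix [0]).getD (closestB v v.length t + 1).toNat 0
        = (v.take (cA + 1)).sum := by
      rw [htoNat, hceq, prefix_getD v (cB + 1) (by omega)]
    exact ih (targets ++ v.take (cA + 1)) (total + (v.foldl stepPrefix [0]).getD (closestB v v.length t + 1).toNat 0) (by rw [List.sum_append, h, hpfx])

-- ===== VERDICT (by name: the statement is the Claim_ definition above) =====
theorem find_closest_sum1_spec : Claim_equal_find_closest_sum1 := by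
  intro vlst tlst _ hpre
  unfold Spec_find_closest_sum1 find_closest_sum1 find_closest_sum1_alt
  set v := PySem.List.sorted vlst (fun x => x) false with hv
  by_cases hnil : v = []
  · rcases hpre with h | h
    · exact absurd ((PySem.List.sorted_eq_nil_iff vlst (fun x => x) false).mp hnil) h
    · simp [h]
  · have hn : 0 < v.length := List.length_pos_iff.mpr hnil
    have hs : v.Pairwise (· ≤ ·) := by
      have := PySem.List.sorted_pairwise (xs := vlst) (key := fun x => x)
      simpa [hv] using this
    simpa using main_fold v hs hn tlst [] 0 rfl

def find_closest_sum1_raises : Claim_raises_find_closest_sum1 := by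
  unfold Claim_raises_find_closest_sum1
  constructor
  · intro vlst tlst _ hr hp
    rcases hr with ⟨h1, h2⟩
    rcases hp with h | h
    · exact h h1
    · exact h2 h
  · decide
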